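-- pv_equiv track=rewrite | github.com/totarorocco/f1-strategy-simulator | utils/helpers.py | is_valid_tire_sequence
-- ===== SOURCE A (Python) =====
-- from typing import Any, Dict, List, Optional, Union, Tuple
--
-- def is_valid_tire_sequence(tire_sequence: List[str]) -> bool:
--     """
--     Validate tire sequence for F1 regulations.
--
--     Args:
--         tire_sequence: List of tire compound names
--
--     Returns:
--         True if sequence is valid
--     """
--
--     if not tire_sequence:
--         return False
--
--     valid_compounds = {'soft', 'medium', 'hard', 'intermediate', 'wet'}
--
--     # Check all compounds are valid
--     for compound in tire_sequence:
--         if compound.lower() not in valid_compounds: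
--             return False
--
--     # F1 regulation: Must use at least 2 different dry compounds during race
--     dry_compounds = [c for c in tire_sequence if c.lower() in {'soft', 'medium', 'hard'}]
--     unique_dry_compounds = set(c.lower() for c in dry_compounds)
--
--     if len(dry_compounds) > 0 and len(unique_dry_compounds) < 2:
--         return False  # Need at least 2 different dry compounds
--
--     return True
-- ===== SOURCE B (Python) =====
-- def is_valid_tire_sequence(tire_sequence):
--     """
--     Validate tire sequence for F1 regulations: single-pass state machine
--     tracking three dry-compound flags, no intermediate collections.
--     """
--     soft = medium = hard = False
--     for compound in tire_sequence:
--         name = compound.lower()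
--         if name == 'soft':
--             soft = True
--         elif name == 'medium':
--             medium = True
--         elif name == 'hard':
--             hard = True
--         elif name != 'intermediate' and name != 'wet':
--             return False
--     return bool(tire_sequence) and soft + medium + hard != 1
-- ===== Notes on version B (the rewrite author's own statement) =====
-- stated objective: alternative
-- what changed: Replaces A's staged passes (validity loop, dry-compound list comprehension, set of lowered names, two cardinality tests) by a single-pass state machine that lowers each element once and maintains three boolean flags (soft/medium/hard seen), returning False on the first invalid name and finally testing non-emptiness and flag-sum != 1; no intermediate lists or sets are built.
import Mathlib
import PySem

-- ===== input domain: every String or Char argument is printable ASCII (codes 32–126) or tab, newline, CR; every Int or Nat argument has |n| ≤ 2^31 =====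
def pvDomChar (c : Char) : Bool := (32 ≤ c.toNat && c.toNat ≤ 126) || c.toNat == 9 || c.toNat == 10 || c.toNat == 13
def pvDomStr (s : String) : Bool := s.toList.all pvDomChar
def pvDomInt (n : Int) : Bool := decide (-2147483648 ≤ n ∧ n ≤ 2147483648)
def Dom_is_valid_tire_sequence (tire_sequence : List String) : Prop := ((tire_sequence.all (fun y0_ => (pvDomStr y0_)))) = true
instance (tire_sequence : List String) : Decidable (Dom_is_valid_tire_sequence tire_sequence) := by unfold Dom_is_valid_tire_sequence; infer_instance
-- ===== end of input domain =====

-- B replaces A's staged passes (validity loop, dry list, set of lowered names, two cardinality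
-- tests) by one single-pass state machine over three boolean flags (objective: alternative).

-- ===== PORT A =====
def pvValidA : PySem.Set String := PySem.Set.ofList ["soft", "medium", "hard", "intermediate", "wet"]
def pvDryA : PySem.Set String := PySem.Set.ofList ["soft", "medium", "hard"]

-- A's 'for compound in tire_sequence: if …: return False' loop
def pvCheckAllA : List String → Bool
  | [] => true
  | c :: rest =>
      if !(PySem.Set.contains pvValidA (PySem.Str.lower c)) then false else pvCheckAllA rest

def is_valid_tire_sequence (tire_sequence : List String) : Bool :=
  if tire_sequence.isEmpty then false
  else if pvCheckAllA tire_sequence then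
    let dry_compounds := tire_sequence.filter (fun c => PySem.Set.contains pvDryA (PySem.Str.lower c))
    let unique_dry := PySem.Set.ofList (dry_compounds.map (fun c => PySem.Str.lower c))
    if dry_compounds.length > 0 && PySem.Set.len unique_dry < 2 then false else true
  else false

-- ===== PORT B =====
-- B's single loop: state (soft, medium, hard); 'return False' mid-loop = none
def pvScanB : List String → Bool → Bool → Bool → Option (Bool × Bool × Bool)
  | [], s, m, h => some (s, m, h)
  | c :: rest, s, m, h =>
      let name := PySem.Str.lower c
      if name == "soft" then pvScanB rest true m h
      else if name == "medium" then pvScanB rest s true h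
      else if name == "hard" then pvScanB rest s m true
      else if name != "intermediate" && name != "wet" then none
      else pvScanB rest s m h

def is_valid_tire_sequence_alt (tire_sequence : List String) : Bool :=
  match pvScanB tire_sequence false false false with
  | none => false
  | some (s, m, h) =>
      !tire_sequence.isEmpty &&
        !((cond s (1:Int) 0 + cond m 1 0 + cond h 1 0) == 1)

-- ===== PRECONDITION & SPEC =====
def Spec_is_valid_tire_sequence (tire_sequence : List String) (out : Bool) : Prop := out = is_valid_tire_sequence_alt tire_sequence
instance (tire_sequence : List String) (out : Bool) : Decidable (Spec_is_valid_tire_sequence tire_sequence out) := by unfold Spec_is_valid_tire_sequence; infer_instance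

-- ===== CLAIM (what is proved, stated in full; the proofs are below) =====
def Claim_equal_is_valid_tire_sequence : Prop := ∀ (tire_sequence : List String), Dom_is_valid_tire_sequence tire_sequence → Spec_is_valid_tire_sequence tire_sequence (is_valid_tire_sequence tire_sequence)

-- ===== LEMMAS AND PROOFS =====

-- B's scan succeeds exactly when every lowered name is valid, and then returns the
-- initial flags OR-ed with "does some element lower to soft / medium / hard".
theorem pvScanB_eq (ts : List String) : ∀ (s m h : Bool),
    pvScanB ts s m h =
      if ts.all (fun c => PySem.Set.contains pvValidA (PySem.Str.lower c)) then
        some (s || ts.any (fun c => PySem.Str.lower c == "soft"),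
              m || ts.any (fun c => PySem.Str.lower c == "medium"),
              h || ts.any (fun c => PySem.Str.lower c == "hard"))
      else none := by
  induction ts with
  | nil => intro s m h; simp [pvScanB]
  | cons c rest ih =>
      intro s m h
      simp only [pvScanB, List.all_cons, List.any_cons]
      by_cases h1 : PySem.Str.lower c = "soft"
      · simp [h1, ih, pvValidA, PySem.Set.ofList]
      · by_cases h2 : PySem.Str.lower c = "medium"
        · simp [h1, h2, ih, pvValidA, PySem.Set.ofList]
        · by_cases h3 : PySem.Str.lower c = "hard"
          · simp [h1, h2, h3, ih, pvValidA, PySem.Set.ofList]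
          · by_cases h4 : PySem.Str.lower c = "intermediate"
            · simp [h1, h2, h3, h4, ih, pvValidA, PySem.Set.ofList]
            · by_cases h5 : PySem.Str.lower c = "wet"
              · simp [h1, h2, h3, h4, h5, ih, pvValidA, PySem.Set.ofList]
              · simp [h1, h2, h3, h4, h5, pvValidA, PySem.Set.ofList]

-- A's early-return loop is the 'all elements valid' test
theorem pvCheckAllA_eq_all (ts : List String) :
    pvCheckAllA ts = ts.all (fun c => PySem.Set.contains pvValidA (PySem.Str.lower c)) := by
  induction ts with
  | nil => rfl
  | cons c rest ih =>
      simp only [pvCheckAllA, List.all_cons]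
      by_cases h : PySem.Set.contains pvValidA (PySem.Str.lower c) = true <;> simp [h, ih]

-- membership in pvDryA, spelled out
theorem contains_dry_iff (x : String) :
    PySem.Set.contains pvDryA x = (x == "soft" || x == "medium" || x == "hard") := by
  simp only [pvDryA, PySem.Set.ofList]
  rw [Bool.eq_iff_iff, PySem.Set.contains_iff]
  simp [PySem.Set.ofList]
  tauto

-- A's dry-compound list is nonempty iff some flag is set
theorem dry_nonempty_iff (ts : List String) :
    decide ((ts.filter (fun c => PySem.Set.contains pvDryA (PySem.Str.lower c))).length > 0)
      = (ts.any (fun c => PySem.Str.lower c == "soft")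
         || ts.any (fun c => PySem.Str.lower c == "medium")
         || ts.any (fun c => PySem.Str.lower c == "hard")) := by
  rw [Bool.eq_iff_iff]
  simp only [decide_eq_true_eq, List.length_pos_iff, ne_eq, List.filter_eq_nil_iff,
    Bool.or_eq_true, List.any_eq_true, not_forall]
  push_neg
  constructor
  · rintro ⟨c, hc, hd⟩
    rw [contains_dry_iff] at hd
    simp only [Bool.or_eq_true, beq_iff_eq] at hd
    rcases hd with (h | h) | h
    · exact Or.inl (Or.inl ⟨c, hc, by simp [h]⟩)
    · exact Or.inl (Or.inr ⟨c, hc, by simp [h]⟩)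
    · exact Or.inr ⟨c, hc, by simp [h]⟩
  · rintro ((⟨c, hc, hx⟩ | ⟨c, hc, hx⟩) | ⟨c, hc, hx⟩) <;>
      exact ⟨c, hc, by rw [contains_dry_iff]; simp_all⟩

-- A's unique-dry set has as many elements as there are set flags
theorem len_unique_eq (ts : List String) :
    (PySem.Set.ofList ((ts.filter (fun c => PySem.Set.contains pvDryA (PySem.Str.lower c))).map
        (fun c => PySem.Str.lower c))).length
      = (cond (ts.any (fun c => PySem.Str.lower c == "soft")) 1 0
         + cond (ts.any (fun c => PySem.Str.lower c == "medium")) 1 0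
         + cond (ts.any (fun c => PySem.Str.lower c == "hard")) 1 0 : Nat) := by
  have hperm :
      (PySem.Set.ofList ((ts.filter (fun c => PySem.Set.contains pvDryA (PySem.Str.lower c))).map
          (fun c => PySem.Str.lower c))).Perm
        ((["soft", "medium", "hard"] : List String).filter
          (fun x => ts.any (fun c => PySem.Str.lower c == x))) := by
    apply (List.perm_ext_iff_of_nodup (PySem.Set.nodup_ofList _) ?_).2
    · intro x
      rw [PySem.Set.mem_ofList]
      simp only [List.mem_map, List.mem_filter, List.any_eq_true]
      constructor
      · rintro ⟨c, ⟨hc, hd⟩, rfl⟩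
        rw [contains_dry_iff] at hd
        simp only [Bool.or_eq_true, beq_iff_eq] at hd
        refine ⟨?_, c, hc, by simp⟩
        rcases hd with (h | h) | h <;> simp [h]
      · rintro ⟨hx, c, hc, hcx⟩
        rw [beq_iff_eq] at hcx
        exact ⟨c, ⟨hc, by rw [contains_dry_iff, hcx]; fin_cases hx <;> simp⟩, hcx⟩
    · exact List.Nodup.filter _ (by decide)
  rw [hperm.length_eq]
  cases ha : ts.any (fun c => PySem.Str.lower c == "soft") <;>
    cases hb : ts.any (fun c => PySem.Str.lower c == "medium") <;>
      cases hd : ts.any (fun c => PySem.Str.lower c == "hard") <;>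
        simp [List.filter, ha, hb, hd]

-- ===== VERDICT (by name: the statement is the Claim_ definition above) =====
theorem is_valid_tire_sequence_spec : Claim_equal_is_valid_tire_sequence := by
  intro ts _
  unfold Spec_is_valid_tire_sequence
  simp only [is_valid_tire_sequence, is_valid_tire_sequence_alt, pvCheckAllA_eq_all,
    pvScanB_eq, Bool.false_or]
  by_cases hall : ts.all (fun c => PySem.Set.contains pvValidA (PySem.Str.lower c)) = true
  · rw [if_pos hall, if_pos hall]
    by_cases he : ts.isEmpty = true
    · simp [he]
    · rw [if_neg he]
      simp only [he, Bool.not_false, Bool.true_and, PySem.Set.len, len_unique_eq]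
      have hd := dry_nonempty_iff ts
      cases ha : ts.any (fun c => PySem.Str.lower c == "soft") <;>
        cases hb : ts.any (fun c => PySem.Str.lower c == "medium") <;>
          cases hc : ts.any (fun c => PySem.Str.lower c == "hard") <;>
            rw [ha, hb, hc] at hd <;> simp_all
  · rw [if_neg hall, if_neg hall]
    cases h : ts.isEmpty <;> simp
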